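-- pv_equiv track=rewrite | github.com/JohanPETIT/FootTracker | Detection/10frames_test.py | reclassify_phases
-- ===== SOURCE A (Python) =====
-- def reclassify_phases(segment_labels):
--     reclassified_labels = []
--     previous_label = 'no_event'  # Commencez avec 'no_event' pour traiter correctement le premier segment
--
--     for current_label in segment_labels:
--         if previous_label == 'no_event':
--             if current_label == 'no_event':
--                 reclassified_labels.append('no_event')  # Conservez 'no_event' si pas d'autres événements
--             elif current_label == 'start':
--                 reclassified_labels.append('start')
--             else:
--                 reclassified_labels.append(current_label)
--         elif previous_label == 'start':
--             if current_label in ['challenge', 'start']: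
--                 reclassified_labels.append('start')
--             elif current_label == 'play':
--                 reclassified_labels.append('play')
--             else:
--                 reclassified_labels.append(current_label)
--         elif previous_label == 'challenge':
--             if current_label in ['challenge', 'end']:
--                 reclassified_labels.append('challenge')
--             else:
--                 reclassified_labels.append(current_label)
--         elif previous_label == 'play':
--             if current_label in ['play', 'challenge', 'throwin']:
--                 reclassified_labels.append('play')
--             else:
--                 reclassified_labels.append(current_label)
--         else:
--             reclassified_labels.append(current_label)
--         previous_label = current_label
--
--     return reclassified_labels
-- ===== SOURCE B (Python) =====
-- OVERRIDES = [('start', 'challenge'), ('challenge', 'end'),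
--              ('play', 'challenge'), ('play', 'throwin')]
--
--
-- def reclassify_phases(segment_labels):
--     # Copy-then-patch: start from the labels unchanged, then for each override
--     # rule (p, c) make one pass overwriting out[i] with p wherever the pair
--     # (labels[i-1], labels[i]) matches that rule.  Correct because every
--     # non-override position keeps its own label and each override position is
--     # matched by exactly the rule whose pair it carries.
--     out = list(segment_labels)
--     for p, c in OVERRIDES:
--         for i in range(1, len(segment_labels)):
--             if segment_labels[i - 1] == p and segment_labels[i] == c:
--                 out[i] = p
--     return out
-- ===== Notes on version B (the rewrite author's own statement) =====
-- stated objective: alternative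
-- what changed: Replaces A's single stateful pass through a nested if/elif branch tree with a copy-then-patch scheme: B copies the label list and then runs one rule-major pass per override transition (start/challenge, challenge/end, play/challenge, play/throwin), overwriting out[i] with the previous label wherever that rule's pair matches; correct because at most one rule matches a position and every unmatched position keeps its own label.
import Mathlib
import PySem

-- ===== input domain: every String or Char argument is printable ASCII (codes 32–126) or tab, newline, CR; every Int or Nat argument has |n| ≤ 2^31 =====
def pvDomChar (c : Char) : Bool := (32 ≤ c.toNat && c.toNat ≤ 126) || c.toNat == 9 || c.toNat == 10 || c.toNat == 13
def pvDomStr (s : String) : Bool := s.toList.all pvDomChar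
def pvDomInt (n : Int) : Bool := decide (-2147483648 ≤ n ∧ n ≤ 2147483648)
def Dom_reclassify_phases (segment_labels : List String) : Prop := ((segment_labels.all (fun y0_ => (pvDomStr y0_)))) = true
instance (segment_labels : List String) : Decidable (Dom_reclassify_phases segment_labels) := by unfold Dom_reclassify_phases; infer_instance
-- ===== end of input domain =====

-- B replaces A's single stateful pass with its nested branch tree by a copy-then-patch
-- scheme: start from the labels unchanged and run one patch pass per override rule (alternative).

-- ===== PORT A =====
-- A's loop body (the if/elif branch tree, in source order), deciding what is appended.
def reclassifyStep (previous_label current_label : String) : String :=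
  if previous_label = "no_event" then
    if current_label = "no_event" then "no_event"
    else if current_label = "start" then "start"
    else current_label
  else if previous_label = "start" then
    if current_label = "challenge" ∨ current_label = "start" then "start"
    else if current_label = "play" then "play"
    else current_label
  else if previous_label = "challenge" then
    if current_label = "challenge" ∨ current_label = "end" then "challenge"
    else current_label
  else if previous_label = "play" then
    if current_label = "play" ∨ current_label = "challenge" ∨ current_label = "throwin" then "play"
    else current_label
  else current_label

-- A's for-loop as structural recursion carrying previous_label.
def reclassifyLoop (previous_label : String) : List String → List String
  | [] => []
  | current_label :: rest =>
      reclassifyStep previous_label current_label :: reclassifyLoop current_label rest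

def reclassify_phases (segment_labels : List String) : List String :=
  reclassifyLoop "no_event" segment_labels

-- ===== PORT B =====
def pvOverrides : List (String × String) :=
  [("start", "challenge"), ("challenge", "end"), ("play", "challenge"), ("play", "throwin")]

-- Source B's inner loop: 'for i in range(1, len(segment_labels)): if …: out[i] = p'.
-- Indices are always in range here, so pyGetD/pySetD are exact for Python's seg[i-1], seg[i], out[i]=p.
def patchPass (seg : List String) (p c : String) (out : List String) : List String :=
  (PySem.List.pyRange 1 seg.length 1).foldl
    (fun out i =>
      if PySem.List.pyGetD seg (i - 1) "" = p ∧ PySem.List.pyGetD seg i "" = c then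
        PySem.List.pySetD out i p
      else out) out

def reclassify_phases_alt (segment_labels : List String) : List String :=
  pvOverrides.foldl (fun out pc => patchPass segment_labels pc.1 pc.2 out) segment_labels

-- ===== PRECONDITION & SPEC =====
def Spec_reclassify_phases (segment_labels : List String) (out : List String) : Prop := out = reclassify_phases_alt segment_labels
instance (segment_labels : List String) (out : List String) : Decidable (Spec_reclassify_phases segment_labels out) := by unfold Spec_reclassify_phases; infer_instance

-- ===== CLAIM =====
def Claim_equal_reclassify_phases : Prop := ∀ (segment_labels : List String), Dom_reclassify_phases segment_labels → Spec_reclassify_phases segment_labels (reclassify_phases segment_labels)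

-- ===== LEMMAS AND PROOFS =====

-- Every patch pass preserves the length of out.
theorem patchPass_length (seg : List String) (p c : String) :
    ∀ (L : List Int) (out : List String),
      (L.foldl (fun out i =>
        if PySem.List.pyGetD seg (i - 1) "" = p ∧ PySem.List.pyGetD seg i "" = c then
          PySem.List.pySetD out i p
        else out) out).length = out.length := by
  intro L
  induction L with
  | nil => intro out; rfl
  | cons x L ih =>
      intro out
      simp only [List.foldl_cons]
      rw [ih]
      split_ifs
      · exact PySem.List.length_pySetD out x p
      · rfl

-- Pointwise effect of one patch pass run over range(1, m).
theorem patchLoop_get (seg : List String) (p c : String) :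
    ∀ (m : Nat) (out : List String) (j : Nat), j < out.length →
      ((PySem.List.pyRange 1 (m : Int) 1).foldl (fun out i =>
        if PySem.List.pyGetD seg (i - 1) "" = p ∧ PySem.List.pyGetD seg i "" = c then
          PySem.List.pySetD out i p
        else out) out)[j]? =
      if 1 ≤ j ∧ j < m ∧ seg.getD (j - 1) "" = p ∧ seg.getD j "" = c then some p
      else out[j]? := by
  intro m
  induction m with
  | zero =>
      intro out j hj
      rw [PySem.List.pyRange_one_eq_nil (by norm_num)]
      simp only [List.foldl_nil]
      rw [if_neg (by omega)]
  | succ m ih =>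
      intro out j hj
      by_cases hm : 1 ≤ m
      · have hr : PySem.List.pyRange 1 ((m : Int) + 1) 1
            = PySem.List.pyRange 1 (m : Int) 1 ++ [(m : Int)] :=
          PySem.List.pyRange_one_succ_right (by exact_mod_cast hm)
        have hcast : ((m + 1 : Nat) : Int) = (m : Int) + 1 := by push_cast; ring
        rw [hcast, hr, List.foldl_append]
        simp only [List.foldl_cons, List.foldl_nil]
        have hlen := patchPass_length seg p c (PySem.List.pyRange 1 (m : Int) 1) out
        have hm1 : ((m : Int) - 1) = ((m - 1 : Nat) : Int) := by omega
        by_cases hC : seg.getD (m - 1) "" = p ∧ seg.getD m "" = c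
        · rw [if_pos (by
            rw [hm1]
            simpa [PySem.List.pyGetD_natCast] using hC)]
          rw [PySem.List.pySetD_natCast]
          rw [List.getElem?_set]
          by_cases hjm : m = j
          · subst hjm
            rw [if_pos rfl, if_pos (by omega), if_pos (by exact ⟨hm, by omega, hC⟩)]
          · rw [if_neg hjm]
            rw [ih out j hj]
            by_cases hmatch : 1 ≤ j ∧ j < m ∧ seg.getD (j - 1) "" = p ∧ seg.getD j "" = c
            · rw [if_pos hmatch, if_pos ⟨hmatch.1, by omega, hmatch.2.2⟩]
            · rw [if_neg hmatch, if_neg (by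
                rintro ⟨h1, h2, h3⟩
                exact hmatch ⟨h1, by omega, h3⟩)]
        · rw [if_neg (by
            rw [hm1]
            simpa [PySem.List.pyGetD_natCast] using hC)]
          rw [ih out j hj]
          by_cases hmatch : 1 ≤ j ∧ j < m ∧ seg.getD (j - 1) "" = p ∧ seg.getD j "" = c
          · rw [if_pos hmatch, if_pos ⟨hmatch.1, by omega, hmatch.2.2⟩]
          · rw [if_neg hmatch, if_neg (by
              rintro ⟨h1, h2, h3⟩
              by_cases hjm : j = m
              · subst hjm; exact hC h3
              · exact hmatch ⟨h1, by omega, h3⟩)]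
      · -- m = 0: range(1, 1) is empty
        have hm0 : m = 0 := by omega
        subst hm0
        rw [show ((1 : Nat) : Int) = (1 : Int) by norm_num,
            PySem.List.pyRange_one_eq_nil (by norm_num)]
        simp only [List.foldl_nil]
        rw [if_neg (by omega)]

theorem patchPass_get (seg : List String) (p c : String) (out : List String)
    (j : Nat) (hj : j < out.length) :
    (patchPass seg p c out)[j]? =
      if 1 ≤ j ∧ j < seg.length ∧ seg.getD (j - 1) "" = p ∧ seg.getD j "" = c then some p
      else out[j]? := by
  unfold patchPass
  rw [show ((seg.length : Int)) = ((seg.length : Nat) : Int) by norm_num]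
  exact patchLoop_get seg p c seg.length out j hj

theorem patchPass_len (seg : List String) (p c : String) (out : List String) :
    (patchPass seg p c out).length = out.length :=
  patchPass_length seg p c _ out

-- A's branch tree, rewritten as the chain of the four override tests (innermost-first).
theorem reclassifyStep_eq_chain (p c : String) :
    reclassifyStep p c =
      if p = "play" ∧ c = "throwin" then "play"
      else if p = "play" ∧ c = "challenge" then "play"
      else if p = "challenge" ∧ c = "end" then "challenge"
      else if p = "start" ∧ c = "challenge" then "start"
      else c := by
  unfold reclassifyStep
  split_ifs <;> simp_all

-- The first element is never overridden: with prev = 'no_event' A emits the current label.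
theorem reclassifyStep_no_event (c : String) : reclassifyStep "no_event" c = c := by
  unfold reclassifyStep
  split_ifs <;> simp_all

-- Pointwise value of A's recursion.
theorem reclassifyLoop_get :
    ∀ (xs : List String) (p : String) (j : Nat),
      (reclassifyLoop p xs)[j]? =
        if j < xs.length then
          some (reclassifyStep (if j = 0 then p else xs.getD (j - 1) "") (xs.getD j ""))
        else none := by
  intro xs
  induction xs with
  | nil => intro p j; simp [reclassifyLoop]
  | cons x rest ih =>
      intro p j
      cases j with
      | zero => simp [reclassifyLoop]
      | succ k =>
          simp only [reclassifyLoop, List.getElem?_cons_succ]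
          rw [ih x k]
          cases k with
          | zero =>
              simp
          | succ k' =>
              simp

-- Pointwise value of B: the four patch passes chained.
theorem alt_get (seg : List String) (j : Nat) (hj : j < seg.length) :
    (reclassify_phases_alt seg)[j]? =
      (if 1 ≤ j ∧ j < seg.length ∧ seg.getD (j - 1) "" = "play" ∧ seg.getD j "" = "throwin" then some "play"
       else if 1 ≤ j ∧ j < seg.length ∧ seg.getD (j - 1) "" = "play" ∧ seg.getD j "" = "challenge" then some "play"
       else if 1 ≤ j ∧ j < seg.length ∧ seg.getD (j - 1) "" = "challenge" ∧ seg.getD j "" = "end" then some "challenge"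
       else if 1 ≤ j ∧ j < seg.length ∧ seg.getD (j - 1) "" = "start" ∧ seg.getD j "" = "challenge" then some "start"
       else seg[j]?) := by
  unfold reclassify_phases_alt
  simp only [pvOverrides, List.foldl_cons, List.foldl_nil]
  have l1 := patchPass_len seg "start" "challenge" seg
  have l2 := patchPass_len seg "challenge" "end" (patchPass seg "start" "challenge" seg)
  have l3 := patchPass_len seg "play" "challenge"
      (patchPass seg "challenge" "end" (patchPass seg "start" "challenge" seg))
  rw [patchPass_get seg "play" "throwin" _ j (by rw [l3, l2, l1]; exact hj)]
  rw [patchPass_get seg "play" "challenge" _ j (by rw [l2, l1]; exact hj)]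
  rw [patchPass_get seg "challenge" "end" _ j (by rw [l1]; exact hj)]
  rw [patchPass_get seg "start" "challenge" seg j hj]

theorem alt_length (seg : List String) : (reclassify_phases_alt seg).length = seg.length := by
  unfold reclassify_phases_alt
  simp only [pvOverrides, List.foldl_cons, List.foldl_nil]
  rw [patchPass_len, patchPass_len, patchPass_len, patchPass_len]

-- ===== VERDICT =====
theorem reclassify_phases_spec : Claim_equal_reclassify_phases := by
  intro seg _
  unfold Spec_reclassify_phases
  apply List.ext_getElem?
  intro j
  by_cases hj : j < seg.length
  · rw [alt_get seg j hj]
    unfold reclassify_phases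
    rw [reclassifyLoop_get seg "no_event" j, if_pos hj]
    have hgj : seg[j]? = some (seg.getD j "") := by
      rw [List.getD_eq_getElem?_getD, List.getElem?_eq_getElem hj]; rfl
    cases j with
    | zero =>
        rw [if_pos rfl, reclassifyStep_no_event]
        rw [if_neg (by rintro ⟨h, _⟩; omega), if_neg (by rintro ⟨h, _⟩; omega),
            if_neg (by rintro ⟨h, _⟩; omega), if_neg (by rintro ⟨h, _⟩; omega), hgj]
    | succ k =>
        rw [if_neg (Nat.succ_ne_zero k), reclassifyStep_eq_chain, hgj]
        have h1 : 1 ≤ k + 1 := by omega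
        split_ifs <;> first | rfl | (exfalso; tauto)
  · have h1 : (reclassify_phases seg)[j]? = none := by
      unfold reclassify_phases
      rw [reclassifyLoop_get seg "no_event" j, if_neg hj]
    have h2 : (reclassify_phases_alt seg)[j]? = none := by
      rw [List.getElem?_eq_none_iff, alt_length]; omega
    rw [h1, h2]
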